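-- pv_equiv track=rewrite | github.com/scottiadamson/Mouse_ribosome_footprint_profiling_snakemake | scripts/ID_pauses.py | codon_dict
-- ===== SOURCE A (Python) =====
-- def codon_dict(CDS_seq, offset):
--     pos_dict = {};codon_list = []; codon_centers = {}
--     for i in range(0, int(len(CDS_seq)/3)):
--         this_codon = CDS_seq[i*3:i*3+3]
--         codon_list.append(this_codon)
--         for j in range(i*3,i*3+3):
--             pos_dict[j+offset] = this_codon
--             codon_centers[j+offset] = i*3+offset
--     return pos_dict, codon_list, codon_centers
-- ===== SOURCE B (Python) =====
-- def codon_dict(CDS_seq, offset):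
--     it = iter(CDS_seq)
--     codon_list = [a + b + c for a, b, c in zip(it, it, it)]
--     keys = list(range(offset, offset + 3 * len(codon_list)))
--     repeated = [codon for codon in codon_list for _ in (0, 1, 2)]
--     starts = [offset + 3 * i for i in range(len(codon_list)) for _ in (0, 1, 2)]
--     return dict(zip(keys, repeated)), codon_list, dict(zip(keys, starts))
-- ===== Notes on version B (the rewrite author's own statement) =====
-- stated objective: alternative
-- what changed: A fills both dicts entry-by-entry inside a nested codon/nucleotide index loop; B never indexes: it groups the string into codons with the zip-of-one-iterator idiom, then constructs each dict in one shot as dict(zip(keys, values)) from a contiguous key range and thrice-repeated value lists.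
import Mathlib
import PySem

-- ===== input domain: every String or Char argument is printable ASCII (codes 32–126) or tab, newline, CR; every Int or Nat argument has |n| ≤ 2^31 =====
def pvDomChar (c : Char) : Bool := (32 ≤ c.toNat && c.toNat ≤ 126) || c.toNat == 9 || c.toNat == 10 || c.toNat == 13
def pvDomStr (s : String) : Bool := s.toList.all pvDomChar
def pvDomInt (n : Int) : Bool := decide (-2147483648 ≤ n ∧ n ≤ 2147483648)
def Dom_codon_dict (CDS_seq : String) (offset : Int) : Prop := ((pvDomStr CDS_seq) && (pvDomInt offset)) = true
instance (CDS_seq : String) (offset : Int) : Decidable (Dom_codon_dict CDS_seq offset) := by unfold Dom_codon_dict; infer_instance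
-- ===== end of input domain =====

-- B replaces A's nested codon/nucleotide dict-filling loops by grouping the string into codons
-- with the zip-of-one-iterator idiom and building each dict in one shot as dict(zip(keys, values))
-- from a key range and thrice-repeated value lists; objective: alternative, same cost.

-- ===== PORT A =====
-- int(len(CDS_seq)/3): len ≥ 0, so float-truncation = Euclidean division by 3 (exact here).
def codon_dict (CDS_seq : String) (offset : Int) : (List (Int × String)) × List String × (List (Int × Int)) :=
  let init : PySem.Dict Int String × List String × PySem.Dict Int Int :=
    (PySem.Dict.empty, [], PySem.Dict.empty)
  let res := (PySem.List.pyRange 0 (PySem.Str.len CDS_seq / 3) 1).foldl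
    (fun st i =>
      let this_codon := PySem.Str.slice CDS_seq (some (i*3)) (some (i*3+3))
      let codon_list := st.2.1 ++ [this_codon]
      let inner := (PySem.List.pyRange (i*3) (i*3+3) 1).foldl
        (fun (st2 : PySem.Dict Int String × PySem.Dict Int Int) j => (st2.1.insert (j+offset) this_codon, st2.2.insert (j+offset) (i*3+offset)))
        (st.1, st.2.2)
      (inner.1, codon_list, inner.2))
    init
  (res.1.items, res.2.1, res.2.2.items)

-- ===== PORT B =====
-- zip(it, it, it) over the string groups its characters three at a time, dropping the partial
-- tail: ported as structural recursion on the character list; a+b+c → String.ofList [a, b, c].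
def pvChunk3 : List Char → List String
  | a :: b :: c :: rest => String.ofList [a, b, c] :: pvChunk3 rest
  | _ => []

def codon_dict_alt (CDS_seq : String) (offset : Int) : (List (Int × String)) × List String × (List (Int × Int)) :=
  let codon_list := pvChunk3 CDS_seq.toList
  let keys := PySem.List.pyRange offset (offset + 3 * (codon_list.length : Int)) 1
  let repeated := codon_list.flatMap (fun c => [c, c, c])
  let starts := (PySem.List.pyRange 0 ((codon_list.length : Nat) : Int) 1).flatMap
    (fun i => [offset + 3 * i, offset + 3 * i, offset + 3 * i])
  -- dict(zip(keys, values)): insert the zipped pairs in order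
  let pos_dict := (keys.zip repeated).foldl
    (fun (d : PySem.Dict Int String) kv => d.insert kv.1 kv.2) PySem.Dict.empty
  let codon_centers := (keys.zip starts).foldl
    (fun (d : PySem.Dict Int Int) kv => d.insert kv.1 kv.2) PySem.Dict.empty
  (pos_dict.items, codon_list, codon_centers.items)

-- ===== PRECONDITION & SPEC =====
def Spec_codon_dict (CDS_seq : String) (offset : Int) (out : (List (Int × String)) × List String × (List (Int × Int))) : Prop := out = codon_dict_alt CDS_seq offset
instance (CDS_seq : String) (offset : Int) (out : (List (Int × String)) × List String × (List (Int × Int))) : Decidable (Spec_codon_dict CDS_seq offset out) := by unfold Spec_codon_dict; infer_instance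

-- ===== CLAIM (what is proved, stated in full; the proofs are below) =====
def Claim_equal_codon_dict : Prop := ∀ (CDS_seq : String) (offset : Int), Dom_codon_dict CDS_seq offset → Spec_codon_dict CDS_seq offset (codon_dict CDS_seq offset)

-- ===== LEMMAS AND PROOFS =====

-- a fold whose step updates the two components independently splits into two folds
theorem pvFoldPair {α β ι : Type} (l : List ι) (F : α → ι → α) (G : β → ι → β) (a : α) (b : β) :
    l.foldl (fun s x => (F s.1 x, G s.2 x)) (a, b) = (l.foldl F a, l.foldl G b) := by
  induction l generalizing a b with
  | nil => rfl
  | cons x xs ih => simpa using ih (F a x) (G b x)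

-- A's outer loop: state components evolve independently, so the fold splits into three folds
theorem pvOuterSplit (CDS_seq : String) (offset : Int) (l : List Int)
    (a : PySem.Dict Int String) (b : List String) (c : PySem.Dict Int Int) :
    List.foldl
      (fun (st : PySem.Dict Int String × List String × PySem.Dict Int Int) (i : Int) =>
        (((PySem.List.pyRange (i*3) (i*3+3) 1).foldl
            (fun (st2 : PySem.Dict Int String × PySem.Dict Int Int) j =>
              (st2.1.insert (j+offset) (PySem.Str.slice CDS_seq (some (i*3)) (some (i*3+3))),
               st2.2.insert (j+offset) (i*3+offset)))
            (st.1, st.2.2) : PySem.Dict Int String × PySem.Dict Int Int).1,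
         st.2.1 ++ [PySem.Str.slice CDS_seq (some (i*3)) (some (i*3+3))],
         ((PySem.List.pyRange (i*3) (i*3+3) 1).foldl
            (fun (st2 : PySem.Dict Int String × PySem.Dict Int Int) j =>
              (st2.1.insert (j+offset) (PySem.Str.slice CDS_seq (some (i*3)) (some (i*3+3))),
               st2.2.insert (j+offset) (i*3+offset)))
            (st.1, st.2.2) : PySem.Dict Int String × PySem.Dict Int Int).2))
      (a, b, c) l
    = (l.foldl (fun d i => (PySem.List.pyRange (i*3) (i*3+3) 1).foldl
          (fun d2 j => d2.insert (j+offset) (PySem.Str.slice CDS_seq (some (i*3)) (some (i*3+3)))) d) a,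
       l.foldl (fun cl i => cl ++ [PySem.Str.slice CDS_seq (some (i*3)) (some (i*3+3))]) b,
       l.foldl (fun c2 i => (PySem.List.pyRange (i*3) (i*3+3) 1).foldl
          (fun c3 j => c3.insert (j+offset) (i*3+offset)) c2) c) := by
  induction l generalizing a b c with
  | nil => rfl
  | cons x xs ih =>
    simp only [List.foldl_cons]
    rw [pvFoldPair (PySem.List.pyRange (x*3) (x*3+3) 1)
          (fun d2 j => d2.insert (j+offset) (PySem.Str.slice CDS_seq (some (x*3)) (some (x*3+3))))
          (fun c3 j => c3.insert (j+offset) (x*3+offset)) a c]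
    exact ih _ _ _

-- range(a, a+3) written out
theorem pvRange3 (a : Int) : PySem.List.pyRange a (a+3) 1 = [a, a+1, a+2] := by
  rw [PySem.List.pyRange_one_cons (by omega), PySem.List.pyRange_one_cons (by omega),
      PySem.List.pyRange_one_cons (by omega), PySem.List.pyRange_one_eq_nil (by omega)]
  have h : a + 1 + 1 = a + 2 := by ring
  rw [h]

theorem pvChunk3_length (l : List Char) : (pvChunk3 l).length = l.length / 3 := by
  induction l using pvChunk3.induct with
  | case1 a b c rest ih => simp [pvChunk3, ih]; omega
  | case2 l h => cases l with
    | nil => simp [pvChunk3]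
    | cons a t => cases t with
      | nil => simp [pvChunk3]
      | cons b u => cases u with
        | nil => simp [pvChunk3]
        | cons c v => exact absurd rfl (h a b c v)

theorem pvChunk3_getElem (l : List Char) (k : Nat) (h : k < (pvChunk3 l).length) :
    (pvChunk3 l)[k] = String.ofList ((l.drop (3*k)).take 3) := by
  induction l using pvChunk3.induct generalizing k with
  | case1 a b c rest ih =>
    cases k with
    | zero => simp [pvChunk3]
    | succ k' =>
      have h' : k' < (pvChunk3 rest).length := by simpa [pvChunk3] using h
      have e : 3*(k'+1) = 3*k'+1+1+1 := by omega
      simpa [pvChunk3, e, List.drop_succ_cons] using ih k' h'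
  | case2 l hne =>
    exfalso
    cases l with
    | nil => simp [pvChunk3] at h
    | cons a t => cases t with
      | nil => simp [pvChunk3] at h
      | cons b u => cases u with
        | nil => simp [pvChunk3] at h
        | cons c v => exact hne a b c v rfl

-- the iterator-grouping of B is A's per-index slicing
theorem pvChunk3_eq_map (CDS_seq : String) :
    pvChunk3 CDS_seq.toList =
      (PySem.List.pyRange 0 ((CDS_seq.toList.length / 3 : Nat) : Int) 1).map
        (fun i => PySem.Str.slice CDS_seq (some (i*3)) (some (i*3+3))) := by
  apply List.ext_getElem
  · rw [pvChunk3_length, List.length_map, PySem.List.length_pyRange_one]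
    omega
  · intro k h1 h2
    have hk : k < CDS_seq.toList.length / 3 := by
      simpa [pvChunk3_length] using h1
    rw [pvChunk3_getElem _ _ h1, List.getElem_map, PySem.List.getElem_pyRange_one]
    apply String.toList_inj.mp
    rw [PySem.Str.toList_slice]
    have e1 : (0 : Int) + (k : Int) = ((k : Nat) : Int) := by ring
    have e2 : ((k : Nat) : Int) * 3 = ((3*k : Nat) : Int) := by push_cast; ring
    have e3 : ((k : Nat) : Int) * 3 + 3 = ((3*k+3 : Nat) : Int) := by push_cast; ring
    rw [e1, e3, e2]
    show _ = PySem.List.slice CDS_seq.toList (some ((3*k : Nat) : Int)) (some ((3*k+3 : Nat) : Int))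
    rw [PySem.List.slice_natCast]
    simp [show 3*k+3-3*k = 3 by omega]

-- pair list of A's/B's position dict: keys off, off+1, off+2, …, value = the covering codon
def pvTriP : List String → Int → List (Int × String)
  | [], _ => []
  | c :: rest, off => (off, c) :: (off+1, c) :: (off+2, c) :: pvTriP rest (off+3)

-- pair list of the codon-centers dict: value = the codon's start position
def pvTriC : Nat → Int → List (Int × Int)
  | 0, _ => []
  | k+1, off => (off, off) :: (off+1, off) :: (off+2, off) :: pvTriC k (off+3)

theorem pvTriP_append (cs : List String) (c : String) (off : Int) :
    pvTriP (cs ++ [c]) off =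
      pvTriP cs off ++ [(off + 3*(cs.length : Int), c), (off + 3*(cs.length : Int) + 1, c),
                        (off + 3*(cs.length : Int) + 2, c)] := by
  induction cs generalizing off with
  | nil => simp [pvTriP]
  | cons c' cs ih =>
    simp only [List.cons_append, pvTriP, ih]
    have e1 : off + 3 + 3*(cs.length : Int) = off + 3*(((c' :: cs).length : Int)) := by
      push_cast [List.length_cons]; ring
    rw [e1]

theorem pvTriC_succ_right (k : Nat) (off : Int) :
    pvTriC (k+1) off =
      pvTriC k off ++ [(off + 3*(k : Int), off + 3*(k : Int)), (off + 3*(k : Int) + 1, off + 3*(k : Int)),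
                       (off + 3*(k : Int) + 2, off + 3*(k : Int))] := by
  induction k generalizing off with
  | zero => simp [pvTriC]
  | succ k ih =>
    have h1 : pvTriC (k+1+1) off = (off, off) :: (off+1, off) :: (off+2, off) :: pvTriC (k+1) (off+3) := rfl
    rw [h1, ih (off+3)]
    have e1 : off + 3 + 3*(k : Int) = off + 3*(((k+1 : Nat)) : Int) := by push_cast; ring
    rw [e1]
    rfl

-- A's nested position-dict loop inserts exactly the pvTriP pairs in order
theorem pvAPos (g : Int → String) (off : Int) (m : Nat) (d : PySem.Dict Int String) :
    (PySem.List.pyRange 0 (m : Int) 1).foldl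
      (fun d i => (PySem.List.pyRange (i*3) (i*3+3) 1).foldl
        (fun d2 j => d2.insert (j+off) (g i)) d) d
    = (pvTriP ((PySem.List.pyRange 0 (m : Int) 1).map g) off).foldl
        (fun d kv => d.insert kv.1 kv.2) d := by
  induction m generalizing d with
  | zero => simp [PySem.List.pyRange_one_eq_nil, pvTriP]
  | succ m ih =>
    have hc : ((m+1 : Nat) : Int) = (m : Int) + 1 := by push_cast; ring
    rw [hc, PySem.List.pyRange_one_succ_right (by positivity), List.foldl_append, ih,
        List.map_append]
    simp only [List.map_cons, List.map_nil, List.foldl_cons, List.foldl_nil]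
    rw [pvTriP_append, List.foldl_append, pvRange3 ((m : Int)*3)]
    have hlen : (((PySem.List.pyRange 0 (m : Int) 1).map g).length : Int) = (m : Int) := by
      rw [List.length_map, PySem.List.length_pyRange_one]; omega
    rw [hlen]
    simp only [List.foldl_cons, List.foldl_nil]
    have e1 : (m : Int)*3 + off = off + 3*(m : Int) := by ring
    have e2 : (m : Int)*3 + 1 + off = off + 3*(m : Int) + 1 := by ring
    have e3 : (m : Int)*3 + 2 + off = off + 3*(m : Int) + 2 := by ring
    rw [e1, e2, e3]

-- A's nested codon-centers loop inserts exactly the pvTriC pairs in order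
theorem pvACen (off : Int) (m : Nat) (d : PySem.Dict Int Int) :
    (PySem.List.pyRange 0 (m : Int) 1).foldl
      (fun c i => (PySem.List.pyRange (i*3) (i*3+3) 1).foldl
        (fun c2 j => c2.insert (j+off) (i*3+off)) c) d
    = (pvTriC m off).foldl (fun d kv => d.insert kv.1 kv.2) d := by
  induction m generalizing d with
  | zero => simp [PySem.List.pyRange_one_eq_nil, pvTriC]
  | succ m ih =>
    have hc : ((m+1 : Nat) : Int) = (m : Int) + 1 := by push_cast; ring
    rw [hc, PySem.List.pyRange_one_succ_right (by positivity), List.foldl_append, ih,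
        pvTriC_succ_right, List.foldl_append]
    simp only [List.foldl_cons, List.foldl_nil]
    rw [pvRange3 ((m : Int)*3)]
    simp only [List.foldl_cons, List.foldl_nil]
    have e0 : (m : Int)*3 + off = off + 3*(m : Int) := by ring
    have e2 : (m : Int)*3 + 1 + off = off + 3*(m : Int) + 1 := by ring
    have e3 : (m : Int)*3 + 2 + off = off + 3*(m : Int) + 2 := by ring
    rw [e0, e2, e3]

-- B's zip of the key range with the thrice-repeated codons is the pvTriP pair list
theorem pvBPos (cs : List String) (off : Int) :
    (PySem.List.pyRange off (off + 3*(cs.length : Int)) 1).zip (cs.flatMap (fun c => [c, c, c]))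
      = pvTriP cs off := by
  induction cs generalizing off with
  | nil => simp [PySem.List.pyRange_one_eq_nil, pvTriP]
  | cons c cs ih =>
    have hlen : (0 : Int) ≤ (cs.length : Int) := by positivity
    have hb : off + 3*(((c :: cs).length : Nat) : Int) = (off + 3) + 3*(cs.length : Int) := by
      push_cast [List.length_cons]; ring
    rw [hb, PySem.List.pyRange_one_cons (by omega), PySem.List.pyRange_one_cons (by omega),
        PySem.List.pyRange_one_cons (by omega)]
    have h3 : off + 1 + 1 + 1 = off + 3 := by ring
    have h2 : off + 1 + 1 = off + 2 := by ring
    rw [h3, h2]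
    simp only [List.flatMap_cons, List.cons_append, List.nil_append, List.zip_cons_cons]
    rw [ih (off + 3)]
    rfl

-- B's zip of the key range with the repeated codon starts is the pvTriC pair list
theorem pvBCen (m : Nat) (off : Int) :
    (PySem.List.pyRange off (off + 3*(m : Int)) 1).zip
      ((PySem.List.pyRange 0 (m : Int) 1).flatMap (fun i => [off + 3*i, off + 3*i, off + 3*i]))
      = pvTriC m off := by
  induction m with
  | zero => simp [PySem.List.pyRange_one_eq_nil, pvTriC]
  | succ m ih =>
    have hc : ((m+1 : Nat) : Int) = (m : Int) + 1 := by push_cast; ring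
    have hb : off + 3*((m : Int) + 1) = (off + 3*(m : Int)) + 3 := by ring
    rw [hc, hb, PySem.List.pyRange_one_succ_right (by positivity),
        PySem.List.pyRange_one_append off (off + 3*(m : Int)) ((off + 3*(m : Int)) + 3)
          (by omega) (by omega),
        List.flatMap_append]
    rw [List.zip_append (by
      simp [PySem.List.length_pyRange_one, List.length_flatMap]
      omega)]
    rw [ih, pvRange3 (off + 3*(m : Int)), pvTriC_succ_right]
    simp only [List.flatMap_cons, List.flatMap_nil, List.append_nil,
      List.zip_cons_cons, List.zip_nil_right]

-- ===== VERDICT (by name: the statement is the Claim_ definition above) =====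
theorem codon_dict_spec : Claim_equal_codon_dict := by
  intro CDS_seq offset _
  unfold Spec_codon_dict codon_dict codon_dict_alt
  dsimp only
  have hdiv : PySem.Str.len CDS_seq / 3 = ((CDS_seq.toList.length / 3 : Nat) : Int) := by
    rw [PySem.Str.len_eq]; exact_mod_cast rfl
  rw [hdiv, pvOuterSplit, pvAPos, pvACen, PySem.List.foldl_append_singleton_eq_map,
      List.nil_append,
      pvBPos (pvChunk3 CDS_seq.toList) offset,
      pvBCen ((pvChunk3 CDS_seq.toList).length) offset,
      pvChunk3_eq_map CDS_seq]
  have hlen : (List.map (fun i => PySem.Str.slice CDS_seq (some (i * 3)) (some (i * 3 + 3)))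
      (PySem.List.pyRange 0 ((CDS_seq.toList.length / 3 : Nat) : Int) 1)).length
      = CDS_seq.toList.length / 3 := by
    rw [List.length_map, PySem.List.length_pyRange_one]; omega
  rw [hlen]
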